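-- pv_equiv track=rewrite | github.com/bob686868/Leetcode-100-day-challenge- | day30.py | minIndexOfAValidSplit
-- ===== SOURCE A (Python) =====
-- from collections import defaultdict
--
-- def minIndexOfAValidSplit(nums):
--     dominantNum,count=0,0
--     ## determine dominant element
--     for n in nums:
--         if n != dominantNum:
--             count-=1
--             if count<0:
--                 dominantNum=n
--                 count=1
--         else:count+=1
--
--     countLeft=defaultdict(int)
--     countRight=defaultdict(int)
--     for n in nums:
--         if n==dominantNum:
--             countRight[n]+=1
--
--     for i in range(len(nums)):
--         n=nums[i]
--         if n==dominantNum: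
--             countLeft[n]+=1
--             countRight[n]-=1
--         if countLeft[n]>(i+1)//2 and countRight[n]>(len(nums)-1-i)//2:
--             return i
--     return -1
-- ===== SOURCE B (Python) =====
-- from collections import Counter
--
-- def minIndexOfAValidSplit(nums):
--     if not nums:
--         return -1
--     cnt = Counter(nums)
--     cand = max(cnt, key=lambda v: cnt[v])
--     total = cnt[cand]
--     n = len(nums)
--     if 2 * total <= n:
--         return -1
--     left = 0
--     for i, x in enumerate(nums):
--         if x == cand:
--             left += 1
--             if 2 * left > i + 1 and 2 * (total - left) > n - 1 - i:
--                 return i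
--     return -1
-- ===== Notes on version B (the rewrite author's own statement) =====
-- stated objective: alternative
-- what changed: Replaces A's Boyer-Moore voting pass and two defaultdicts with a Counter built once, a max-count candidate, an early no-majority exit, and a single validating pass over one integer counter.
import Mathlib
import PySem

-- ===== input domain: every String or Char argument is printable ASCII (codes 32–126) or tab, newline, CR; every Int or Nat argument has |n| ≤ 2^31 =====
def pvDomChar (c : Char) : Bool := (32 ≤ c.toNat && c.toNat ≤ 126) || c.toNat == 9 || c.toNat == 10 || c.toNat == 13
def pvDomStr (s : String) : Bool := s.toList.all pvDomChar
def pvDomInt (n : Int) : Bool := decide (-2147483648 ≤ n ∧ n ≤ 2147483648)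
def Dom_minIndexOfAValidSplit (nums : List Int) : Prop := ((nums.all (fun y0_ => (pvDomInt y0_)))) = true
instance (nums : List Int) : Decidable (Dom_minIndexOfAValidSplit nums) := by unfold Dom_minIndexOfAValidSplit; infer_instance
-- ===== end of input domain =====

-- B replaces A's Boyer–Moore voting pass by a Counter/max-count candidate with an early
-- no-majority exit and a single validating pass with one integer counter (objective: simpler).

-- ===== PORT A =====
-- Boyer–Moore voting step: 'if n != dominantNum: count-=1; if count<0: dominantNum,count=n,1 else: count+=1'
def bmStep (dc : Int × Int) (x : Int) : Int × Int :=
  if x ≠ dc.1 then (if dc.2 - 1 < 0 then (x, 1) else (dc.1, dc.2 - 1))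
  else (dc.1, dc.2 + 1)

-- A's final loop: 'for i in range(len(nums)): …' carrying the two defaultdicts
def aLoop (len dom : Int) : List Int → Int → PySem.Dict Int Int → PySem.Dict Int Int → Int
  | [], _, _, _ => -1
  | x :: rest, i, cl, cr =>
    let cl' := if x = dom then cl.insert x (cl.getD x 0 + 1) else cl
    let cr' := if x = dom then cr.insert x (cr.getD x 0 - 1) else cr
    if cl'.getD x 0 > PySem.Int.floordiv (i + 1) 2 ∧
       cr'.getD x 0 > PySem.Int.floordiv (len - 1 - i) 2 then i
    else aLoop len dom rest (i + 1) cl' cr'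

def minIndexOfAValidSplit (nums : List Int) : Int :=
  let dc := nums.foldl bmStep (0, 0)
  let dom := dc.1
  let cr := nums.foldl (fun d x => if x = dom then d.insert x (d.getD x 0 + 1) else d)
              PySem.Dict.empty
  aLoop (nums.length : Int) dom nums 0 PySem.Dict.empty cr

-- ===== PORT B =====
-- B's validating pass: checks only at positions holding the candidate, one counter 'left'
def altLoop (cand total len : Int) : List Int → Int → Int → Int
  | [], _, _ => -1
  | x :: rest, i, left =>
    if x = cand then
      if 2 * (left + 1) > i + 1 ∧ 2 * (total - (left + 1)) > len - 1 - i then i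
      else altLoop cand total len rest (i + 1) (left + 1)
    else altLoop cand total len rest (i + 1) left

def minIndexOfAValidSplit_alt (nums : List Int) : Int :=
  match nums with
  | [] => -1
  | _ :: _ =>
    let cnt := PySem.Dict.counter nums
    match PySem.List.max? cnt.keys (fun v => cnt.getD v 0) with
    | none => -1   -- unreachable: counter of a nonempty list has a nonempty key list
    | some cand =>
      let total := cnt.getD cand 0
      let len : Int := (nums.length : Int)
      if 2 * total ≤ len then -1
      else altLoop cand total len nums 0 0

-- ===== PRECONDITION & SPEC =====
def Spec_minIndexOfAValidSplit (nums : List Int) (out : Int) : Prop := out = minIndexOfAValidSplit_alt nums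
instance (nums : List Int) (out : Int) : Decidable (Spec_minIndexOfAValidSplit nums out) := by unfold Spec_minIndexOfAValidSplit; infer_instance

-- ===== CLAIM (what is proved, stated in full; the proofs are below) =====
def Claim_equal_minIndexOfAValidSplit : Prop := ∀ (nums : List Int), Dom_minIndexOfAValidSplit nums → Spec_minIndexOfAValidSplit nums (minIndexOfAValidSplit nums)

-- ===== LEMMAS AND PROOFS =====

-- A's dict-carrying loop equals B's one-counter loop for the same candidate and total.
lemma aLoop_eq_altLoop (rest : List Int) : ∀ (len dom total i l : Int)
    (cl cr : PySem.Dict Int Int),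
    (∀ y, cl.getD y 0 = if y = dom then l else 0) →
    (∀ y, cr.getD y 0 = if y = dom then total - l else 0) →
    0 ≤ i →
    aLoop len dom rest i cl cr = altLoop dom total len rest i l := by
  induction rest with
  | nil => intros; rfl
  | cons x t ih =>
    intro len dom total i l cl cr hcl hcr hi
    by_cases hx : x = dom
    · subst hx
      have h1 : (cl.insert x (cl.getD x 0 + 1)).getD x 0 = l + 1 := by
        rw [PySem.Dict.getD_insert]; simp [hcl x]
      have h2 : (cr.insert x (cr.getD x 0 - 1)).getD x 0 = total - (l + 1) := by
        rw [PySem.Dict.getD_insert]; simp [hcr x]; ring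
      simp only [aLoop, altLoop, if_true]
      rw [PySem.Int.floordiv_eq_ediv_of_pos (show (0:Int) < 2 by omega),
          PySem.Int.floordiv_eq_ediv_of_pos (show (0:Int) < 2 by omega), h1, h2]
      have hcnd : ((l + 1 > (i + 1) / 2 ∧ total - (l + 1) > (len - 1 - i) / 2) ↔
          (2 * (l + 1) > i + 1 ∧ 2 * (total - (l + 1)) > len - 1 - i)) := by
        constructor <;> (intro ⟨a, b⟩; exact ⟨by omega, by omega⟩)
      split_ifs with hA hB hB
      · rfl
      · exact absurd (hcnd.mp hA) hB
      · exact absurd (hcnd.mpr hB) hA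
      · apply ih
        · intro y; rw [PySem.Dict.getD_insert]
          by_cases hy : y = x <;> simp [hy, hcl x, hcl y]
        · intro y; rw [PySem.Dict.getD_insert]
          by_cases hy : y = x
          · simp [hy, hcr x]; ring
          · simp [hy, hcr y]
        · omega
    · simp only [aLoop, altLoop, hx, ite_false]
      have h0 : cl.getD x 0 = 0 := by rw [hcl x]; simp [hx]
      rw [h0, PySem.Int.floordiv_eq_ediv_of_pos (show (0:Int) < 2 by omega)]
      rw [if_neg (by
            rintro ⟨ha, -⟩
            omega)]
      exact ih len dom total (i + 1) l cl cr hcl hcr (by omega)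

-- the countRight-building fold produces a dict holding exactly count(dom) at key dom
lemma crInit (dom : Int) (xs : List Int) : ∀ (d : PySem.Dict Int Int) (y : Int),
    (xs.foldl (fun d x => if x = dom then d.insert x (d.getD x 0 + 1) else d) d).getD y 0
      = d.getD y 0 + (if y = dom then (xs.count dom : Int) else 0) := by
  induction xs with
  | nil => intro d y; simp
  | cons x t ih =>
    intro d y
    simp only [List.foldl_cons]
    by_cases hx : x = dom
    · subst hx
      rw [if_pos rfl, ih]
      rw [PySem.Dict.getD_insert]
      by_cases hy : y = x
      · simp [hy]; ring
      · simp [hy]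
    · rw [if_neg hx, ih]
      simp [hx]

-- Boyer–Moore invariant: every non-candidate value occupies at most half of the scanned input
lemma bm_inv (xs : List Int) : ∀ (d c : Int), 0 ≤ c →
    0 ≤ (xs.foldl bmStep (d, c)).2 ∧
    ∀ y, y ≠ (xs.foldl bmStep (d, c)).1 →
      2 * ((xs.count y : Int) + (if y = d then c else 0))
        ≤ (xs.length : Int) + c - (xs.foldl bmStep (d, c)).2 := by
  induction xs with
  | nil =>
    intro d c hc
    refine ⟨hc, ?_⟩
    intro y hy
    simp only [List.foldl_nil] at hy ⊢
    simp [if_neg hy]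
  | cons x t ih =>
    intro d c hc
    simp only [List.foldl_cons, List.length_cons]
    by_cases hxd : x = d
    · have hstep : bmStep (d, c) x = (d, c + 1) := by simp [bmStep, hxd]
      rw [hstep]
      obtain ⟨h1, h2⟩ := ih d (c + 1) (by omega)
      refine ⟨h1, ?_⟩
      intro y hy
      have hT := h2 y hy
      by_cases hyd : y = d <;>
        simp only [List.count_cons, hxd, hyd, beq_iff_eq] at hT ⊢ <;>
        (try split_ifs at hT ⊢) <;> (try push_cast at hT ⊢) <;> omega
    · by_cases hc0 : c - 1 < 0
      · have hcz : c = 0 := by omega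
        subst hcz
        have hstep : bmStep (d, 0) x = (x, 1) := by simp [bmStep, hxd]
        rw [hstep]
        obtain ⟨h1, h2⟩ := ih x 1 (by omega)
        refine ⟨h1, ?_⟩
        intro y hy
        have hT := h2 y hy
        by_cases hyx : y = x <;> by_cases hyd : y = d <;>
          simp only [List.count_cons, hyx, hyd, beq_iff_eq] at hT ⊢ <;>
          (try split_ifs at hT ⊢) <;> (try push_cast at hT ⊢) <;> omega
      · have hstep : bmStep (d, c) x = (d, c - 1) := by simp [bmStep, hxd, hc0]
        rw [hstep]
        obtain ⟨h1, h2⟩ := ih d (c - 1) (by omega)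
        refine ⟨h1, ?_⟩
        intro y hy
        have hT := h2 y hy
        by_cases hyx : y = x <;> by_cases hyd : y = d <;>
          simp only [List.count_cons, hyx, hyd, beq_iff_eq] at hT ⊢ <;>
          (try split_ifs at hT ⊢) <;> (try push_cast at hT ⊢) <;> omega

lemma bm_major (nums : List Int) (y : Int)
    (h : 2 * (nums.count y : Int) > (nums.length : Int)) :
    y = (nums.foldl bmStep (0, 0)).1 := by
  by_contra hy
  obtain ⟨h1, h2⟩ := bm_inv nums 0 0 le_rfl
  have hT := h2 y hy
  split_ifs at hT <;> omega

-- if the candidate has no strict majority the validating loop never fires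
lemma altLoop_of_nomajor (rest : List Int) : ∀ (cand total len i l : Int),
    2 * total ≤ len → altLoop cand total len rest i l = -1 := by
  induction rest with
  | nil => intros; rfl
  | cons x t ih =>
    intro cand total len i l h
    simp only [altLoop]
    split_ifs with hx hc
    · omega
    · exact ih cand total len (i + 1) (l + 1) h
    · exact ih cand total len (i + 1) l h

-- ===== VERDICT (by name: the statement is the Claim_ definition above) =====
-- A's value, expressed through B's validating loop run on A's Boyer–Moore candidate
lemma A_as_altLoop (nums : List Int) :
    minIndexOfAValidSplit nums =
      altLoop (nums.foldl bmStep (0, 0)).1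
        ((nums.count (nums.foldl bmStep (0, 0)).1 : Int)) (nums.length : Int) nums 0 0 := by
  unfold minIndexOfAValidSplit
  apply aLoop_eq_altLoop
  · intro y; simp [PySem.Dict.getD_empty]
  · intro y; rw [crInit]; simp [PySem.Dict.getD_empty]
  · omega

theorem minIndexOfAValidSplit_spec : Claim_equal_minIndexOfAValidSplit := by
  unfold Claim_equal_minIndexOfAValidSplit Spec_minIndexOfAValidSplit
  intro nums _
  cases hn : nums with
  | nil => rfl
  | cons a t =>
    rw [← hn, A_as_altLoop]
    unfold minIndexOfAValidSplit_alt
    rw [hn]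
    simp only [← hn]
    cases hm : PySem.List.max? (PySem.Dict.counter nums).keys
        (fun v => (PySem.Dict.counter nums).getD v 0) with
    | none =>
      exfalso
      rw [PySem.List.max?_eq_none_iff] at hm
      have : a ∈ (PySem.Dict.counter nums).keys := by
        rw [PySem.Dict.keys_counter, PySem.Set.mem_ofList, hn]; exact List.mem_cons_self
      rw [hm] at this
      exact absurd this (List.not_mem_nil)
    | some cand =>
      have hcand : (PySem.Dict.counter nums).getD cand 0 = (nums.count cand : Int) :=
        PySem.Dict.getD_counter nums cand
      simp only [hcand]
      by_cases hmaj : 2 * (nums.count cand : Int) ≤ (nums.length : Int)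
      · rw [if_pos hmaj]
        apply altLoop_of_nomajor
        set dom := (nums.foldl bmStep (0, 0)).1 with hdom
        by_cases hdm : dom ∈ nums
        · have hk : dom ∈ (PySem.Dict.counter nums).keys := by
            rw [PySem.Dict.keys_counter, PySem.Set.mem_ofList]; exact hdm
          have := PySem.List.max?_isMax hm dom hk
          simp only [hcand, PySem.Dict.getD_counter] at this
          have : (nums.count dom : Int) ≤ (nums.count cand : Int) := this
          omega
        · have : nums.count dom = 0 := List.count_eq_zero.mpr hdm
          rw [this]
          have : (0 : Int) ≤ (nums.length : Int) := by positivity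
          omega
      · rw [if_neg hmaj]
        have hc : cand = (nums.foldl bmStep (0, 0)).1 :=
          bm_major nums cand (by omega)
        rw [hc]
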